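-- pv_equiv track=rewrite | github.com/zhukaijun0629/Programming_Daily-Practice | archive_before_2024/2021-02-23_Sudoku-Check.py | checkUnit
-- ===== SOURCE A (Python) =====
-- def checkUnit(candidates):
--     unit_set = set()
--     for item in candidates:
--         if item == ' ':
--             continue
--         if item in unit_set:
--             return False
--         unit_set.add(item)
--     return True
-- ===== SOURCE B (Python) =====
-- def checkUnit(candidates):
--     filtered = [c for c in candidates if c != ' ']
--     return len(filtered) == len(set(filtered))
-- ===== Notes on version B (the rewrite author's own statement) =====
-- stated objective: simpler
-- what changed: Replaces the incremental early-exit membership loop (add items one by one, return False on first repeat) with a single bulk pass: filter out blanks, then compare the list length with the size of the set built from it.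
import Mathlib
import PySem

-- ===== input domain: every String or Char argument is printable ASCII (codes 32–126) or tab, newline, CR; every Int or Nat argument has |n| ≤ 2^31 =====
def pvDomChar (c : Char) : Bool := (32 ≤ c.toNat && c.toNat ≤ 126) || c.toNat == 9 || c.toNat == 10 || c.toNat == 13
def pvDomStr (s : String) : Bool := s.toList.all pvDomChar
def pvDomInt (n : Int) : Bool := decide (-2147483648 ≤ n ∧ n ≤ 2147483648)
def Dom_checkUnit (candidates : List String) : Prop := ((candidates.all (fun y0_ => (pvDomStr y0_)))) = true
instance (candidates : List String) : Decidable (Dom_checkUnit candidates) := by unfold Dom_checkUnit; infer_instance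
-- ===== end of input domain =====

-- B replaces A's incremental early-exit membership loop with a bulk filter + length-vs-set-size comparison (simpler decomposition).


-- ===== PORT A =====
-- A's loop: skip ' ', early-return false on a repeat, else add to the set.
def checkUnitLoop : List String → PySem.Set String → Bool
  | [], _ => true
  | item :: rest, s =>
    if item == " " then checkUnitLoop rest s
    else if PySem.Set.contains s item then false
    else checkUnitLoop rest (PySem.Set.add s item)

def checkUnit (candidates : List String) : Bool :=
  checkUnitLoop candidates PySem.Set.empty

-- ===== PORT B =====
def checkUnit_alt (candidates : List String) : Bool :=
  let filtered := candidates.filter (fun c => c != " ")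
  filtered.length == (PySem.Set.ofList filtered).length

-- ===== PRECONDITION & SPEC =====
def Spec_checkUnit (candidates : List String) (out : Bool) : Prop := out = checkUnit_alt candidates
instance (candidates : List String) (out : Bool) : Decidable (Spec_checkUnit candidates out) := by unfold Spec_checkUnit; infer_instance

-- ===== CLAIM (what is proved, stated in full; the proofs are below) =====
def Claim_equal_checkUnit : Prop := ∀ (candidates : List String), Dom_checkUnit candidates → Spec_checkUnit candidates (checkUnit candidates)

-- ===== LEMMAS AND PROOFS =====

-- A's loop returns true iff the non-blank items are distinct and none is already in the set.
lemma checkUnitLoop_eq_true_iff (l : List String) (s : PySem.Set String) :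
    checkUnitLoop l s = true ↔
      ((l.filter (fun c => c != " ")).Nodup ∧ ∀ x ∈ l.filter (fun c => c != " "), x ∉ s) := by
  induction l generalizing s with
  | nil => simp [checkUnitLoop]
  | cons x rest ih =>
    by_cases hx : x = " "
    · subst hx
      simp [checkUnitLoop, ih]
    · by_cases hmem : x ∈ s
      · have hc : PySem.Set.contains s x = true := by
          simp [PySem.Set.contains, hmem]
        have hfalse : checkUnitLoop (x :: rest) s = false := by
          simp [checkUnitLoop, hx, hmem]
        rw [hfalse]
        simp only [Bool.false_eq_true, false_iff, not_and]
        rintro -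
        intro hall
        exact absurd hmem (hall x (by simp [hx]))
      · have hc : PySem.Set.contains s x = false := by
          simp [PySem.Set.contains, hmem]
        simp only [checkUnitLoop, beq_iff_eq, hc, Bool.false_eq_true, if_false, ih,
          List.filter_cons, bne_iff_ne, ne_eq, hx, not_false_eq_true, if_true,
          List.nodup_cons, List.mem_cons, PySem.Set.mem_add]
        constructor
        · rintro ⟨hnd, hall⟩
          refine ⟨⟨fun hxr => (hall x hxr) (Or.inr rfl), hnd⟩, ?_⟩
          rintro y (rfl | hy)
          · exact hmem
          · exact fun hys => (hall y hy) (Or.inl hys)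
        · rintro ⟨⟨hxr, hnd⟩, hall⟩
          refine ⟨hnd, fun y hy hys => ?_⟩
          rcases hys with h | rfl
          · exact (hall y (Or.inr hy)) h
          · exact hxr hy

-- set(xs) has the same length as the ordered dedup of xs.
lemma length_ofList_eq_length_dedup (xs : List String) :
    (PySem.Set.ofList xs).length = xs.dedup.length := by
  have hperm : (PySem.Set.ofList xs).Perm xs.dedup := by
    rw [List.perm_ext_iff_of_nodup (PySem.Set.nodup_ofList xs) (List.nodup_dedup xs)]
    intro a
    rw [PySem.Set.mem_ofList, List.mem_dedup]
  exact hperm.length_eq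

-- length xs = length (dedup xs) iff Nodup
lemma length_eq_dedup_iff (xs : List String) :
    (xs.length = xs.dedup.length) ↔ xs.Nodup := by
  constructor
  · intro h
    have hsub : xs.dedup.Sublist xs := List.dedup_sublist xs
    have : xs.dedup = xs := hsub.eq_of_length h.symm
    rw [← this]; exact List.nodup_dedup xs
  · intro h
    rw [List.dedup_eq_self.mpr h]

-- B returns true iff the non-blank items are distinct.
lemma checkUnit_alt_eq_true_iff (candidates : List String) :
    checkUnit_alt candidates = true ↔ (candidates.filter (fun c => c != " ")).Nodup := by
  unfold checkUnit_alt
  simp only [beq_iff_eq, length_ofList_eq_length_dedup]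
  exact length_eq_dedup_iff _

-- ===== VERDICT (by name: the statement is the Claim_ definition above) =====
theorem checkUnit_spec : Claim_equal_checkUnit := by
  intro candidates _
  unfold Spec_checkUnit checkUnit
  rw [Bool.eq_iff_iff, checkUnitLoop_eq_true_iff, checkUnit_alt_eq_true_iff]
  simp [PySem.Set.empty]
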